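-- pv_equiv track=rewrite | github.com/kdh12345/AlgorithmStudy | 프로그래머스/2/340211. ［PCCP 기출문제］ 3번 ／ 충돌위험 찾기/［PCCP 기출문제］ 3번 ／ 충돌위험 찾기.py | solution
-- ===== SOURCE A (Python) =====
-- from collections import Counter
--
-- def mov(route,arr):
--     idx = 0
--     pa = []
--     for i in range(len(route)-1):
--         sx,sy = arr[route[i]-1]
--         ex,ey = arr[route[i+1]-1]
--
--         while sx!=ex:
--             pa.append((sx,sy,idx))
--             if sx < ex:
--                 sx += 1
--             else:
--                 sx -= 1
--             idx+=1
--         while sy != ey: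
--             pa.append((sx,sy,idx))
--             if sy < ey:
--                 sy += 1
--             else:
--                 sy -= 1
--             idx += 1
--     pa.append((sx,sy,idx))
--     return pa
--
-- def solution(points, routes):
--     answer = 0
--
--     arr = [i for i in points]
--     result = []
--
--     for r in routes:
--         result.extend(mov(r,arr))
--
--     tmp = Counter(result)
--     for i in tmp.values():
--         if i >= 2:
--             answer+=1
--
--
--     return answer
-- ===== SOURCE B (Python) =====
-- def _path(route, points):
--     x, y = points[route[0] - 1]
--     cells = []
--     for r in route[1:]:
--         ex, ey = points[r - 1]
--         dx, dy = abs(ex - x), abs(ey - y)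
--         ux = 1 if ex >= x else -1
--         uy = 1 if ey >= y else -1
--         t = len(cells)
--         cells += [(x + ux * k, y, t + k) for k in range(dx)]
--         cells += [(ex, y + uy * k, t + dx + k) for k in range(dy)]
--         x, y = ex, ey
--     cells.append((x, y, len(cells)))
--     return cells
--
--
-- def solution(points, routes):
--     paths = [_path(r, points) for r in routes]
--     longest = max((len(p) for p in paths), default=0)
--     answer = 0
--     for t in range(longest):
--         here = [p[t] for p in paths if t < len(p)]
--         for c in set(here):
--             if here.count(c) > 1:
--                 answer += 1
--     return answer
-- ===== Notes on version B (the rewrite author's own statement) =====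
-- stated objective: alternative
-- what changed: B builds each robot's timed path from arithmetic range spans (carried position, offsets computed from abs/sign, not step-by-step while loops) and then counts collisions TIME-major: for each timestep it collects the positions of the robots still moving and counts positions held by more than one robot, instead of A's robot-major concatenation of all cells followed by a Counter pass over the whole list.
import Mathlib
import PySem

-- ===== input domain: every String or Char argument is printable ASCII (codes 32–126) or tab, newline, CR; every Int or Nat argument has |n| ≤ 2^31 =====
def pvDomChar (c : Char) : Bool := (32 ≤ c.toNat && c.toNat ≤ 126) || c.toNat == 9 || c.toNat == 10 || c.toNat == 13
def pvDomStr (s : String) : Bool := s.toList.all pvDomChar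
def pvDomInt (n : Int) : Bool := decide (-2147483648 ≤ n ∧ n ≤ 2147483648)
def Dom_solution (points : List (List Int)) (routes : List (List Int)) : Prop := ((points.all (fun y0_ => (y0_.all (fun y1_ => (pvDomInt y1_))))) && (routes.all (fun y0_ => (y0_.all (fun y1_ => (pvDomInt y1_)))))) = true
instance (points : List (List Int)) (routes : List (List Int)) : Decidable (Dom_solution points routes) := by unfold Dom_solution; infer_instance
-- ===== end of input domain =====

-- B is a different algorithm: it builds each robot's timed path from arithmetic range spans and then
-- sweeps TIME-major (for each timestep, the positions of the robots still moving, counting positions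
-- held by ≥ 2 robots), instead of A's robot-major concatenation plus a Counter pass; same return value.

-- ===== PORT A =====

-- 'sx,sy = arr[route[i]-1]' : unpack the 2-element point at Python index route[i]-1
-- (negative index from the end, exactly as Python); Pre_ guarantees the index is in range
-- and the point has exactly 2 coordinates, so the catch-all (0, 0) branch is never taken.
def getPt (arr : List (List Int)) (r : Int) : Int × Int :=
  match PySem.List.pyGet? arr (r - 1) with
  | some (a :: b :: _) => (a, b)
  | _ => (0, 0)

-- 'while sx != ex: pa.append((sx,sy,idx)); sx += 1 or -= 1; idx += 1'; returns (pa, sx, idx)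
def whileX (ex sy : Int) (sx idx : Int) (pa : List (Int × Int × Int)) :
    List (Int × Int × Int) × Int × Int :=
  if sx = ex then (pa, sx, idx)
  else if sx < ex then whileX ex sy (sx + 1) (idx + 1) (pa ++ [(sx, sy, idx)])
  else whileX ex sy (sx - 1) (idx + 1) (pa ++ [(sx, sy, idx)])
termination_by (ex - sx).natAbs
decreasing_by all_goals omega

-- 'while sy != ey: …'; returns (pa, sy, idx)
def whileY (ey sx : Int) (sy idx : Int) (pa : List (Int × Int × Int)) :
    List (Int × Int × Int) × Int × Int :=
  if sy = ey then (pa, sy, idx)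
  else if sy < ey then whileY ey sx (sy + 1) (idx + 1) (pa ++ [(sx, sy, idx)])
  else whileY ey sx (sy - 1) (idx + 1) (pa ++ [(sx, sy, idx)])
termination_by (ey - sy).natAbs
decreasing_by all_goals omega

-- one iteration of 'for i in range(len(route)-1)' processing the segment from stop ra to
-- stop rb; state is (sx, sy, idx, pa); the incoming sx, sy are overwritten, exactly as in A
def segStep (arr : List (List Int)) (ra rb : Int)
    (st : Int × Int × Int × List (Int × Int × Int)) :
    Int × Int × Int × List (Int × Int × Int) :=
  let s := getPt arr ra                                 -- (sx, sy); the incoming position is discarded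
  let e := getPt arr rb                                 -- (ex, ey)
  let q1 := whileX e.1 s.2 s.1 st.2.2.1 st.2.2.2        -- (pa, sx, idx) after the x-loop
  let q2 := whileY e.2 q1.2.1 s.2 q1.2.2 q1.1           -- (pa, sy, idx) after the y-loop
  (q1.2.1, q2.2.1, q2.2.2, q2.1)

-- the body of 'for i in range(len(route)-1)': the segment from route[i] to route[i+1]
def movBody (route : List Int) (arr : List (List Int))
    (st : Int × Int × Int × List (Int × Int × Int)) (i : Nat) :
    Int × Int × Int × List (Int × Int × Int) :=
  segStep arr (route.getD i 0) (route.getD (i + 1) 0) st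

def mov (route : List Int) (arr : List (List Int)) : List (Int × Int × Int) :=
  let st := (List.range (route.length - 1)).foldl (movBody route arr) (0, 0, 0, [])
  st.2.2.2 ++ [(st.1, st.2.1, st.2.2.1)]

def solution (points : List (List Int)) (routes : List (List Int)) : Int :=
  let arr := points.map (fun i => i)
  let result := routes.foldl (fun res r => res ++ mov r arr) []
  let tmp := PySem.Dict.counter result
  tmp.values.foldl (fun answer i => if i ≥ 2 then answer + 1 else answer) 0

-- ===== PORT B =====

-- the body of _path's 'for r in route[1:]' loop; state is (x, y, cells); the two
-- comprehensions over range(dx) / range(dy) become maps over pyRange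
def pathStepB (points : List (List Int))
    (st : Int × Int × List (Int × Int × Int)) (r : Int) :
    Int × Int × List (Int × Int × Int) :=
  let e := getPt points r                               -- (ex, ey)
  let dx : Int := |e.1 - st.1|
  let dy : Int := |e.2 - st.2.1|
  let ux : Int := if e.1 ≥ st.1 then 1 else -1
  let uy : Int := if e.2 ≥ st.2.1 then 1 else -1
  let t : Int := (st.2.2.length : Int)                  -- t = len(cells)
  (e.1, e.2,
    st.2.2 ++ (PySem.List.pyRange 0 dx).map (fun k => (st.1 + ux * k, st.2.1, t + k))
            ++ (PySem.List.pyRange 0 dy).map (fun k => (e.1, st.2.1 + uy * k, t + dx + k)))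

-- _path(route, points)
def pathB (route : List Int) (points : List (List Int)) : List (Int × Int × Int) :=
  let s := getPt points (PySem.List.pyGetD route 0 0)   -- (x, y) = points[route[0]-1]
  let st := (route.drop 1).foldl (pathStepB points) (s.1, s.2, [])  -- route[1:] = drop 1 (exact: start ≥ 0)
  st.2.2 ++ [(st.1, st.2.1, (st.2.2.length : Int))]

-- the body of 'for t in range(longest)': the positions occupied at timestep t, then
-- 'for c in set(here): if here.count(c) > 1: answer += 1' (a count over a set — order-independent)
def timeStep (paths : List (List (Int × Int × Int))) (answer : Int) (t : Int) : Int :=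
  let here := (paths.filter (fun p => decide (t < (p.length : Int)))).map
      (fun p => PySem.List.pyGetD p t (0, 0, 0))
  (PySem.Set.ofList here).foldl
    (fun ans c => if 1 < here.count c then ans + 1 else ans) answer

def solution_alt (points : List (List Int)) (routes : List (List Int)) : Int :=
  let paths := routes.map (fun r => pathB r points)
  let longest := PySem.List.maxD (paths.map (fun p => (p.length : Int))) (fun x => x) 0
  (PySem.List.pyRange 0 longest).foldl (timeStep paths) 0

-- ===== PRECONDITION & SPEC =====

-- Pre_ is exactly where the Python A returns: every route has ≥ 2 stops (otherwise the final
-- append reads an unassigned sx — NameError), every stop number r yields a valid Python index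
-- r-1 into points (otherwise IndexError), and the addressed point has exactly 2 coordinates
-- (otherwise the unpacking raises ValueError).
def Pre_solution (points : List (List Int)) (routes : List (List Int)) : Prop :=
  ∀ route ∈ routes, 2 ≤ route.length ∧ ∀ r ∈ route,
    PySem.Raise.InRange points.length (r - 1) ∧
    ((PySem.List.pyGet? points (r - 1)).getD []).length = 2
instance (points : List (List Int)) (routes : List (List Int)) : Decidable (Pre_solution points routes) := by unfold Pre_solution; infer_instance

def pvWitness_solution : List (List Int) × List (List Int) :=
  ([[0, 0], [0, 2], [2, 2]], [[1, 2, 3], [3, 2]])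

def Spec_solution (points : List (List Int)) (routes : List (List Int)) (out : Int) : Prop := out = solution_alt points routes
instance (points : List (List Int)) (routes : List (List Int)) (out : Int) : Decidable (Spec_solution points routes out) := by unfold Spec_solution; infer_instance

-- ===== CLAIM (what is proved, stated in full; the proofs are below) =====
def Claim_equal_solution : Prop := ∀ (points : List (List Int)) (routes : List (List Int)), Dom_solution points routes → Pre_solution points routes → Spec_solution points routes (solution points routes)

-- ===== LEMMAS AND PROOFS =====

-- A's whole x-while-loop is the arithmetic span B writes down directly
theorem whileX_map (ex sy sx idx : Int) (pa : List (Int × Int × Int)) :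
    whileX ex sy sx idx pa =
      (pa ++ (List.range (ex - sx).natAbs).map
          (fun k : Nat => (sx + (if ex ≥ sx then (1:Int) else -1) * (k : Int), sy, idx + (k : Int))),
       ex, idx + ((ex - sx).natAbs : Int)) := by
  fun_induction whileX ex sy sx idx pa with
  | case1 a h =>
    simp
  | case2 sx idx pa h hlt ih =>
    rw [ih]
    have hd : (ex - sx).natAbs = (ex - (sx + 1)).natAbs + 1 := by omega
    rw [hd, List.range_succ_eq_map, List.map_cons]
    have hmap : (List.map Nat.succ (List.range (ex - (sx+1)).natAbs)).map
        (fun k : Nat => (sx + (if ex ≥ sx then (1:Int) else -1) * (k : Int), sy, idx + (k : Int))) =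
        (List.range (ex - (sx+1)).natAbs).map
        (fun k : Nat => (sx + 1 + (if ex ≥ sx + 1 then (1:Int) else -1) * (k : Int), sy, idx + 1 + (k : Int))) := by
      rw [List.map_map]
      apply List.map_congr_left
      intro k _
      have h1 : ex ≥ sx := by omega
      have h2 : ex ≥ sx + 1 := by omega
      simp only [Function.comp, h1, h2, if_pos, Nat.succ_eq_add_one, Prod.mk.injEq]
      push_cast
      exact ⟨by ring, trivial, by ring⟩
    rw [hmap]
    simp only [if_pos (by omega : ex ≥ sx), mul_zero, add_zero, Nat.cast_zero]
    rw [List.append_assoc]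
    simp only [List.singleton_append, Prod.mk.injEq]
    exact ⟨trivial, trivial, by push_cast; omega⟩
  | case3 sx idx pa h hlt ih =>
    rw [ih]
    have hd : (ex - sx).natAbs = (ex - (sx - 1)).natAbs + 1 := by omega
    rw [hd, List.range_succ_eq_map, List.map_cons]
    have hmap : (List.map Nat.succ (List.range (ex - (sx-1)).natAbs)).map
        (fun k : Nat => (sx + (if ex ≥ sx then (1:Int) else -1) * (k : Int), sy, idx + (k : Int))) =
        (List.range (ex - (sx-1)).natAbs).map
        (fun k : Nat => (sx - 1 + (if ex ≥ sx - 1 then (1:Int) else -1) * (k : Int), sy, idx + 1 + (k : Int))) := by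
      rw [List.map_map]
      apply List.map_congr_left
      intro k hk
      have hkl : k < (ex - (sx-1)).natAbs := List.mem_range.mp hk
      have h1 : ¬ ex ≥ sx := by omega
      have h2 : ¬ ex ≥ sx - 1 := by omega
      simp only [Function.comp, h1, h2, Nat.succ_eq_add_one, Prod.mk.injEq]
      push_cast
      exact ⟨by ring, trivial, by ring⟩
    rw [hmap]
    simp only [if_neg (by omega : ¬ ex ≥ sx), mul_zero, add_zero, Nat.cast_zero]
    rw [List.append_assoc]
    simp only [List.singleton_append, Prod.mk.injEq]
    exact ⟨trivial, trivial, by push_cast; omega⟩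

theorem whileY_map (ey sx sy idx : Int) (pa : List (Int × Int × Int)) :
    whileY ey sx sy idx pa =
      (pa ++ (List.range (ey - sy).natAbs).map
          (fun k : Nat => (sx, sy + (if ey ≥ sy then (1:Int) else -1) * (k : Int), idx + (k : Int))),
       ey, idx + ((ey - sy).natAbs : Int)) := by
  fun_induction whileY ey sx sy idx pa with
  | case1 a h =>
    simp
  | case2 sy idx pa h hlt ih =>
    rw [ih]
    have hd : (ey - sy).natAbs = (ey - (sy + 1)).natAbs + 1 := by omega
    rw [hd, List.range_succ_eq_map, List.map_cons]
    have hmap : (List.map Nat.succ (List.range (ey - (sy+1)).natAbs)).map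
        (fun k : Nat => (sx, sy + (if ey ≥ sy then (1:Int) else -1) * (k : Int), idx + (k : Int))) =
        (List.range (ey - (sy+1)).natAbs).map
        (fun k : Nat => (sx, sy + 1 + (if ey ≥ sy + 1 then (1:Int) else -1) * (k : Int), idx + 1 + (k : Int))) := by
      rw [List.map_map]
      apply List.map_congr_left
      intro k _
      have h1 : ey ≥ sy := by omega
      have h2 : ey ≥ sy + 1 := by omega
      simp only [Function.comp, h1, h2, if_pos, Nat.succ_eq_add_one, Prod.mk.injEq]
      push_cast
      exact ⟨trivial, by ring, by ring⟩
    rw [hmap]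
    simp only [if_pos (by omega : ey ≥ sy), mul_zero, add_zero, Nat.cast_zero]
    rw [List.append_assoc]
    simp only [List.singleton_append, Prod.mk.injEq]
    exact ⟨trivial, trivial, by push_cast; omega⟩
  | case3 sy idx pa h hlt ih =>
    rw [ih]
    have hd : (ey - sy).natAbs = (ey - (sy - 1)).natAbs + 1 := by omega
    rw [hd, List.range_succ_eq_map, List.map_cons]
    have hmap : (List.map Nat.succ (List.range (ey - (sy-1)).natAbs)).map
        (fun k : Nat => (sx, sy + (if ey ≥ sy then (1:Int) else -1) * (k : Int), idx + (k : Int))) =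
        (List.range (ey - (sy-1)).natAbs).map
        (fun k : Nat => (sx, sy - 1 + (if ey ≥ sy - 1 then (1:Int) else -1) * (k : Int), idx + 1 + (k : Int))) := by
      rw [List.map_map]
      apply List.map_congr_left
      intro k hk
      have hkl : k < (ey - (sy-1)).natAbs := List.mem_range.mp hk
      have h1 : ¬ ey ≥ sy := by omega
      have h2 : ¬ ey ≥ sy - 1 := by omega
      simp only [Function.comp, h1, h2, Nat.succ_eq_add_one, Prod.mk.injEq]
      push_cast
      exact ⟨trivial, by ring, by ring⟩
    rw [hmap]
    simp only [if_neg (by omega : ¬ ey ≥ sy), mul_zero, add_zero, Nat.cast_zero]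
    rw [List.append_assoc]
    simp only [List.singleton_append, Prod.mk.injEq]
    exact ⟨trivial, trivial, by push_cast; omega⟩

-- A's segment recursion, the shared reference shape
def goA (points : List (List Int)) (st : Int × Int × Int × List (Int × Int × Int)) :
    List Int → Int × Int × Int × List (Int × Int × Int)
  | r0 :: r1 :: rs => goA points (segStep points r0 r1 st) (r1 :: rs)
  | _ => st

-- A's fold over range(len(route)-1) is the segment recursion goA
theorem movFold_eq_goA (arr : List (List Int)) (rest : List Int) :
    ∀ (r0 : Int) (st : Int × Int × Int × List (Int × Int × Int)),
      (List.range ((r0 :: rest).length - 1)).foldl (movBody (r0 :: rest) arr) st =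
        goA arr st (r0 :: rest) := by
  induction rest with
  | nil => intro r0 st; simp [goA]
  | cons r1 rs ih =>
    intro r0 st
    show (List.range (rs.length + 1)).foldl (movBody (r0 :: r1 :: rs) arr) st = _
    rw [List.range_succ_eq_map, List.foldl_cons, List.foldl_map]
    have hcongr : List.foldl (fun x (y : Nat) => movBody (r0 :: r1 :: rs) arr x y.succ)
        (movBody (r0 :: r1 :: rs) arr st 0) (List.range rs.length) =
        List.foldl (movBody (r1 :: rs) arr)
        (movBody (r0 :: r1 :: rs) arr st 0) (List.range rs.length) :=
      PySem.List.foldl_congr_mem _ _ _ _ (by intro acc x _; simp [movBody])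
    rw [hcongr]
    have h0 : movBody (r0 :: r1 :: rs) arr st 0 = segStep arr r0 r1 st := by
      simp [movBody]
    rw [h0, goA]
    have := ih r1 (segStep arr r0 r1 st)
    simpa using this

-- a segment step of A, started at the point of its start stop with idx = len(pa),
-- is exactly B's pathStepB (position carried, t read off the list length)
theorem segStep_eq_pathStepB (points : List (List Int)) (ra rb : Int)
    (a b : Int) (out : List (Int × Int × Int)) :
    segStep points ra rb (a, b, (out.length : Int), out) =
      ((pathStepB points ((getPt points ra).1, (getPt points ra).2, out) rb).1,
       (pathStepB points ((getPt points ra).1, (getPt points ra).2, out) rb).2.1,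
       (((pathStepB points ((getPt points ra).1, (getPt points ra).2, out) rb).2.2.length : Int)),
       (pathStepB points ((getPt points ra).1, (getPt points ra).2, out) rb).2.2) := by
  simp only [segStep, pathStepB, whileX_map, whileY_map]
  have habs1 : |(getPt points rb).1 - (getPt points ra).1| =
      (((getPt points rb).1 - (getPt points ra).1).natAbs : Int) := Int.abs_eq_natAbs _
  have habs2 : |(getPt points rb).2 - (getPt points ra).2| =
      (((getPt points rb).2 - (getPt points ra).2).natAbs : Int) := Int.abs_eq_natAbs _
  simp only [habs1, habs2, PySem.List.pyRange_zero_natCast, List.map_map,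
    List.length_append, List.length_map, List.length_range, List.append_assoc]
  push_cast
  simp only [Prod.mk.injEq]
  refine ⟨trivial, trivial, by ring, ?_⟩
  rfl

-- the whole segment recursion agrees with B's carried-position fold
theorem goA_eq_foldB (points : List (List Int)) (rs : List Int) :
    ∀ (r0 : Int) (out : List (Int × Int × Int)),
      goA points ((getPt points r0).1, (getPt points r0).2, (out.length : Int), out) (r0 :: rs) =
        (((rs.foldl (pathStepB points) ((getPt points r0).1, (getPt points r0).2, out))).1,
         ((rs.foldl (pathStepB points) ((getPt points r0).1, (getPt points r0).2, out))).2.1,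
         (((rs.foldl (pathStepB points) ((getPt points r0).1, (getPt points r0).2, out))).2.2.length : Int),
         ((rs.foldl (pathStepB points) ((getPt points r0).1, (getPt points r0).2, out))).2.2) := by
  induction rs with
  | nil => intro r0 out; simp [goA]
  | cons r1 rs ih =>
    intro r0 out
    rw [goA, List.foldl_cons, segStep_eq_pathStepB]
    exact ih r1 (pathStepB points ((getPt points r0).1, (getPt points r0).2, out) r1).2.2

-- goA overwrites the position on its first segment, so the initial position is irrelevant
theorem goA_pos_irrel (points : List (List Int)) (r0 r1 : Int) (rs : List Int)
    (a b a' b' t : Int) (out : List (Int × Int × Int)) :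
    goA points (a, b, t, out) (r0 :: r1 :: rs) = goA points (a', b', t, out) (r0 :: r1 :: rs) := by
  rw [goA, goA]
  rfl

theorem mov_eq_pathB (points : List (List Int)) (route : List Int) (h : 2 ≤ route.length) :
    mov route points = pathB route points := by
  rcases route with _ | ⟨r0, _ | ⟨r1, rs⟩⟩
  · simp at h
  · simp at h
  · unfold mov pathB
    rw [movFold_eq_goA]
    rw [goA_pos_irrel points r0 r1 rs 0 0 (getPt points r0).1 (getPt points r0).2 0 []]
    have hgo := goA_eq_foldB points (r1 :: rs) r0 []
    simp only [List.length_nil, Nat.cast_zero] at hgo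
    rw [hgo]
    simp [PySem.List.pyGetD_zero_cons]

-- ===== stamps: the i-th cell of a generated path carries timestamp i =====

-- '[f(k) for k in range(n)]' with f(k) = c + k enumerates the range [c, c+n)
theorem map_add_pyRange (t n : Int) :
    (PySem.List.pyRange 0 n).map (fun k => t + k) = PySem.List.pyRange t (t + n) := by
  apply List.ext_getElem
  · simp only [List.length_map, PySem.List.length_pyRange_one]
    omega
  · intro i h1 h2
    simp [PySem.List.getElem_pyRange_one]

-- one B segment keeps the timestamps equal to the cell indices
theorem stamps_pathStepB (points : List (List Int)) (st : Int × Int × List (Int × Int × Int))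
    (r : Int)
    (h : st.2.2.map (fun c => c.2.2) = PySem.List.pyRange 0 (st.2.2.length : Int)) :
    (pathStepB points st r).2.2.map (fun c => c.2.2) =
      PySem.List.pyRange 0 ((pathStepB points st r).2.2.length : Int) := by
  obtain ⟨x, y, out⟩ := st
  simp only [pathStepB] at h ⊢
  have hdx : (0:Int) ≤ |(getPt points r).1 - x| := abs_nonneg _
  have hdy : (0:Int) ≤ |(getPt points r).2 - y| := abs_nonneg _
  set dx := |(getPt points r).1 - x| with hdxdef
  set dy := |(getPt points r).2 - y| with hdydef
  set L := ((out.length : Nat) : Int) with hLdef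
  have hL : (0:Int) ≤ L := by positivity
  simp only [List.map_append, List.map_map]
  have hx : ((PySem.List.pyRange 0 dx).map
      (fun k => (x + (if (getPt points r).1 ≥ x then (1:Int) else -1) * k, y, L + k))).map
      (fun c => c.2.2) = PySem.List.pyRange L (L + dx) := by
    rw [List.map_map, ← map_add_pyRange]
    rfl
  have hy : ((PySem.List.pyRange 0 dy).map
      (fun k => ((getPt points r).1, y + (if (getPt points r).2 ≥ y then (1:Int) else -1) * k,
        L + dx + k))).map (fun c => c.2.2) = PySem.List.pyRange (L + dx) (L + dx + dy) := by
    rw [List.map_map, ← map_add_pyRange]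
    rfl
  rw [List.map_map] at hx hy
  rw [hx, hy, h]
  rw [← PySem.List.pyRange_one_append 0 L (L + dx) hL (by omega),
    ← PySem.List.pyRange_one_append 0 (L + dx) (L + dx + dy) (by omega) (by omega)]
  congr 1
  simp only [List.length_append, List.length_map, PySem.List.length_pyRange_one]
  push_cast
  omega

-- the timestamps of a generated path are 0, 1, 2, …
theorem stamps_pathB (route : List Int) (points : List (List Int)) :
    (pathB route points).map (fun c => c.2.2) =
      PySem.List.pyRange 0 ((pathB route points).length : Int) := by
  simp only [pathB]
  have hfold : ∀ (rs : List Int) (x y : Int) (out : List (Int × Int × Int)),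
      out.map (fun c => c.2.2) = PySem.List.pyRange 0 (out.length : Int) →
      (rs.foldl (pathStepB points) (x, y, out)).2.2.map (fun c => c.2.2) =
        PySem.List.pyRange 0 (((rs.foldl (pathStepB points) (x, y, out)).2.2.length : Int)) := by
    intro rs
    induction rs with
    | nil => intro x y out h; simpa using h
    | cons r rs ih =>
      intro x y out h
      rw [List.foldl_cons]
      have := stamps_pathStepB points (x, y, out) r h
      have hq := ih (pathStepB points (x, y, out) r).1 (pathStepB points (x, y, out) r).2.1
        (pathStepB points (x, y, out) r).2.2 this
      simpa using hq
  set q := (route.drop 1).foldl (pathStepB points)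
    ((getPt points (PySem.List.pyGetD route 0 0)).1,
     (getPt points (PySem.List.pyGetD route 0 0)).2, []) with hq
  have hbase := hfold (route.drop 1) (getPt points (PySem.List.pyGetD route 0 0)).1
    (getPt points (PySem.List.pyGetD route 0 0)).2 [] (by simp [PySem.List.pyRange_one_eq_nil])
  rw [← hq] at hbase
  simp only [List.map_append, List.map_cons, List.map_nil, hbase, List.length_append,
    List.length_cons, List.length_nil]
  rw [show ((q.2.2.length + (0 + 1) : Nat) : Int) = (q.2.2.length : Int) + 1 by push_cast; omega]
  have hsing : PySem.List.pyRange ((q.2.2.length : Int)) ((q.2.2.length : Int) + 1) =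
      [((q.2.2.length : Int))] := by
    rw [PySem.List.pyRange_one_cons (by omega), PySem.List.pyRange_one_eq_nil (by omega)]
  rw [← hsing, ← PySem.List.pyRange_one_append 0 ((q.2.2.length : Int))
    (((q.2.2.length : Int)) + 1) (by positivity) (by omega)]

theorem stamp_getElem (p : List (Int × Int × Int))
    (hst : p.map (fun c => c.2.2) = PySem.List.pyRange 0 (p.length : Int))
    (i : Nat) (hi : i < p.length) : (p[i]).2.2 = (i : Int) := by
  have hm : i < (p.map (fun c => c.2.2)).length := by simpa using hi
  have h := List.getElem_of_eq hst hm
  simpa [PySem.List.getElem_pyRange_one] using h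

theorem nodup_of_stamps (p : List (Int × Int × Int))
    (hst : p.map (fun c => c.2.2) = PySem.List.pyRange 0 (p.length : Int)) : p.Nodup := by
  have h := PySem.List.nodup_pyRange_one 0 ((p.length : Nat) : Int)
  rw [← hst] at h
  exact h.of_map

-- ===== the counting argument =====

-- a 0/1 indicator sum over a duplicate-free list with a guaranteed hit is 1
theorem sum_indicator_nodup (ts : List Int) (x : Int) (hnd : ts.Nodup) (hx : x ∈ ts) :
    ((ts.map (fun t => if x = t then (1:Int) else 0)).sum) = 1 := by
  induction ts with
  | nil => simp at hx
  | cons a ts ih =>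
    rcases List.mem_cons.mp hx with h | h
    · subst h
      simp only [List.map_cons, List.sum_cons]
      have hnot : ∀ t ∈ ts, ¬ (x = t) := by
        intro t ht heq
        subst heq
        exact (List.nodup_cons.mp hnd).1 ht
      have hz : (ts.map (fun t => if x = t then (1:Int) else 0)).sum = 0 := by
        apply List.sum_eq_zero
        intro y hy
        obtain ⟨t, ht, rfl⟩ := List.mem_map.mp hy
        simp [hnot t ht]
      rw [hz]
      simp
    · have hne : x ≠ a := by
        intro he
        subst he
        exact (List.nodup_cons.mp hnd).1 h
      simp only [List.map_cons, List.sum_cons, if_neg hne, zero_add]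
      exact ih (List.nodup_cons.mp hnd).2 h

-- partition a countP over a list by a classifying value that is nodup-listed and covers it
theorem countP_partition (S : List (Int × Int × Int)) (p : Int × Int × Int → Bool)
    (ts : List Int) (hnd : ts.Nodup)
    (hcov : ∀ c ∈ S, p c = true → c.2.2 ∈ ts) :
    ((ts.map (fun t => ((S.countP (fun c => p c && decide (c.2.2 = t))) : Int))).sum) =
      ((S.countP p : Nat) : Int) := by
  induction S with
  | nil => simp
  | cons a S ih =>
    have hcov' : ∀ c ∈ S, p c = true → c.2.2 ∈ ts :=
      fun c hc => hcov c (List.mem_cons_of_mem a hc)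
    have hmap : (ts.map (fun t => ((List.countP (fun c => p c && decide (c.2.2 = t)) (a :: S) : Nat) : Int))) =
        ts.map (fun t => ((List.countP (fun c => p c && decide (c.2.2 = t)) S : Nat) : Int) +
          (if p a && decide (a.2.2 = t) then (1:Int) else 0)) := by
      apply List.map_congr_left
      intro t _
      rw [List.countP_cons]
      split_ifs with h <;> simp
    rw [hmap, PySem.List.sum_map_add_int, ih hcov', List.countP_cons]
    by_cases hpa : p a = true
    · have hind : (ts.map (fun t => if p a && decide (a.2.2 = t) then (1:Int) else 0)) =
          ts.map (fun t => if a.2.2 = t then (1:Int) else 0) := by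
        apply List.map_congr_left
        intro t _
        simp [hpa]
      rw [hind, sum_indicator_nodup ts a.2.2 hnd (hcov a List.mem_cons_self hpa), hpa]
      simp
    · have hind : (ts.map (fun t => if p a && decide (a.2.2 = t) then (1:Int) else 0)) =
          ts.map (fun _ => (0:Int)) := by
        apply List.map_congr_left
        intro t _
        simp [hpa]
      rw [hind]
      simp [hpa]

-- a 0/1 indicator sum over a list is a countP (Nat-valued twin of the PySem lemma)
theorem sum_ite_one_zero_nat {β : Type} (Q : β → Prop) [DecidablePred Q] (l : List β) :
    (l.map (fun x => if Q x then 1 else 0)).sum = l.countP (fun x => decide (Q x)) := by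
  induction l with
  | nil => rfl
  | cons a l ih =>
    simp only [List.map_cons, List.sum_cons, List.countP_cons, ih]
    by_cases h : Q a <;> simp [h, Nat.add_comm]

-- how often a timestamped, duplicate-free path holds cell c: once iff it is still moving at
-- time t = c's stamp and sits at c then
theorem count_in_path (p : List (Int × Int × Int))
    (hst : p.map (fun c => c.2.2) = PySem.List.pyRange 0 (p.length : Int))
    (t : Int) (h0 : 0 ≤ t) (c : Int × Int × Int) (hct : c.2.2 = t) :
    p.count c = if (t < (p.length : Int) ∧ PySem.List.pyGetD p t (0,0,0) = c) then 1 else 0 := by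
  have hnd := nodup_of_stamps p hst
  by_cases hin : t < (p.length : Int) ∧ PySem.List.pyGetD p t (0,0,0) = c
  · rw [if_pos hin]
    obtain ⟨hlt, hget⟩ := hin
    rw [PySem.List.pyGetD_eq_getElem p _ h0 (by exact_mod_cast hlt)] at hget
    have hmem : c ∈ p := by
      rw [← hget]
      exact List.getElem_mem _
    exact List.count_eq_one_of_mem hnd hmem
  · rw [if_neg hin, List.count_eq_zero]
    intro hmem
    obtain ⟨i, hi, hieq⟩ := List.mem_iff_getElem.mp hmem
    have hsti := stamp_getElem p hst i hi
    rw [hieq] at hsti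
    have hti : t = (i : Int) := by omega
    apply hin
    refine ⟨by omega, ?_⟩
    rw [PySem.List.pyGetD_eq_getElem p _ h0 (by omega)]
    have hidx : p[t.toNat]'(by omega) = p[i] := by
      congr 1
      omega
    exact hidx.trans hieq

-- the cross-robot collision count at a single timestep t, seen from the flattened list:
-- distinct stamp-t cells with total count ≥ 2 are exactly the positions occupied by ≥ 2 robots at t
theorem perT (P : List (List (Int × Int × Int)))
    (hst : ∀ p ∈ P, p.map (fun c => c.2.2) = PySem.List.pyRange 0 (p.length : Int))
    (t : Int) (h0 : 0 ≤ t) :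
    List.countP (fun c => decide (2 ≤ P.flatten.count c) && decide (c.2.2 = t))
        (PySem.Set.ofList P.flatten) =
      List.countP
        (fun c => decide (1 < ((P.filter (fun p => decide (t < (p.length : Int)))).map
            (fun p => PySem.List.pyGetD p t (0,0,0))).count c))
        (PySem.Set.ofList ((P.filter (fun p => decide (t < (p.length : Int)))).map
            (fun p => PySem.List.pyGetD p t (0,0,0)))) := by
  set F := P.flatten with hF
  set here := (P.filter (fun p => decide (t < (p.length : Int)))).map
      (fun p => PySem.List.pyGetD p t (0,0,0)) with hhere
  have hcount : ∀ c : Int × Int × Int, c.2.2 = t → F.count c = here.count c := by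
    intro c hct
    rw [hF, List.count_flatten]
    have hmapc : P.map (fun p => p.count c) =
        P.map (fun p => if (t < (p.length : Int) ∧ PySem.List.pyGetD p t (0,0,0) = c)
          then 1 else 0) :=
      List.map_congr_left (fun p hp => count_in_path p (hst p hp) t h0 c hct)
    rw [hmapc, sum_ite_one_zero_nat]
    rw [hhere, List.count_eq_countP, List.countP_map, List.countP_filter]
    apply List.countP_congr
    intro p _
    simp only [Function.comp, decide_eq_true_eq, Bool.and_eq_true, beq_iff_eq]
    tauto
  have hmemF : ∀ c, c ∈ here ↔ (c ∈ F ∧ c.2.2 = t) := by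
    intro c
    constructor
    · intro hc
      obtain ⟨p, hpmem, rfl⟩ := List.mem_map.mp hc
      have hpP := (List.mem_filter.mp hpmem).1
      have hlt : t < (p.length : Int) := by
        have := (List.mem_filter.mp hpmem).2
        simpa using this
      have hget := PySem.List.pyGetD_eq_getElem p ((0:Int),(0:Int),(0:Int)) h0 (by exact_mod_cast hlt)
      have hstamp := stamp_getElem p (hst p hpP) t.toNat (by omega)
      constructor
      · rw [hget]
        exact List.mem_flatten.mpr ⟨p, hpP, List.getElem_mem _⟩
      · rw [hget, hstamp]
        omega
    · rintro ⟨hcF, hct⟩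
      obtain ⟨p, hpP, hcp⟩ := List.mem_flatten.mp hcF
      obtain ⟨i, hi, hieq⟩ := List.mem_iff_getElem.mp hcp
      have hsti := stamp_getElem p (hst p hpP) i hi
      rw [hieq] at hsti
      refine List.mem_map.mpr ⟨p, List.mem_filter.mpr ⟨hpP, by simp only [decide_eq_true_eq]; omega⟩, ?_⟩
      rw [PySem.List.pyGetD_eq_getElem p _ h0 (by omega)]
      have hidx : p[t.toNat]'(by omega) = p[i] := by
        congr 1
        omega
      exact hidx.trans hieq
  have hLHS : List.countP (fun c => decide (2 ≤ F.count c) && decide (c.2.2 = t))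
      (PySem.Set.ofList F) =
      List.countP (fun c => decide (2 ≤ F.count c))
        ((PySem.Set.ofList F).filter (fun c => decide (c.2.2 = t))) :=
    (List.countP_filter).symm
  rw [hLHS]
  have hperm : ((PySem.Set.ofList F).filter (fun c => decide (c.2.2 = t))).Perm
      (PySem.Set.ofList here) := by
    rw [List.perm_ext_iff_of_nodup ((PySem.Set.nodup_ofList _).filter _)
      (PySem.Set.nodup_ofList _)]
    intro c
    simp only [List.mem_filter, PySem.Set.mem_ofList, decide_eq_true_eq]
    rw [hmemF c]
  rw [hperm.countP_eq]
  apply List.countP_congr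
  intro c hc
  have hct : c.2.2 = t := ((hmemF c).mp ((PySem.Set.mem_ofList _ _).mp hc)).2
  rw [hcount c hct]
  simp only [decide_eq_true_eq]
  omega

-- ===== VERDICT (by name: the statement is the Claim_ definition above) =====
theorem solution_spec : Claim_equal_solution := by
  intro points routes _ hpre
  unfold Spec_solution solution solution_alt
  simp only [List.map_id']
  have hmv : routes.foldl (fun res r => res ++ mov r points) [] =
      routes.foldl (fun res r => res ++ pathB r points) [] :=
    PySem.List.foldl_congr_mem _ _ _ _
      (by intro acc r hr; rw [mov_eq_pathB points r (hpre r hr).1])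
  rw [hmv, PySem.List.foldl_append_eq_flatMap, List.nil_append, List.flatMap_def]
  set P := routes.map (fun r => pathB r points) with hP
  set F := P.flatten with hF
  have hstP : ∀ p ∈ P, p.map (fun c => c.2.2) = PySem.List.pyRange 0 (p.length : Int) := by
    intro p hp
    obtain ⟨r, _, rfl⟩ := List.mem_map.mp hp
    exact stamps_pathB r points
  have hvals : (PySem.Dict.counter F).values =
      (PySem.Set.ofList F).map (fun k => ((F.count k : Nat) : Int)) := by
    show ((PySem.Dict.counter F).items).map (·.2) = _
    rw [PySem.Dict.items_counter]
    simp [List.map_map, Function.comp]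
  rw [hvals, PySem.List.foldl_ite_add_one, List.countP_map, zero_add]
  set longest := PySem.List.maxD (P.map (fun p => ((p.length : Nat) : Int))) (fun x => x) 0
    with hlongest
  have hTS : ∀ (ans t : Int), timeStep P ans t = ans +
      ((List.countP (fun c => decide (1 < ((P.filter (fun p => decide (t < (p.length : Int)))).map
          (fun p => PySem.List.pyGetD p t ((0:Int),(0:Int),(0:Int)))).count c))
        (PySem.Set.ofList ((P.filter (fun p => decide (t < (p.length : Int)))).map
          (fun p => PySem.List.pyGetD p t ((0:Int),(0:Int),(0:Int))))) : Nat) : Int) := by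
    intro ans t
    unfold timeStep
    rw [PySem.List.foldl_ite_add_one]
  have hfun : timeStep P = (fun ans t => ans +
      ((List.countP (fun c => decide (1 < ((P.filter (fun p => decide (t < (p.length : Int)))).map
          (fun p => PySem.List.pyGetD p t ((0:Int),(0:Int),(0:Int)))).count c))
        (PySem.Set.ofList ((P.filter (fun p => decide (t < (p.length : Int)))).map
          (fun p => PySem.List.pyGetD p t ((0:Int),(0:Int),(0:Int))))) : Nat) : Int)) :=
    funext fun ans => funext fun t => hTS ans t
  rw [hfun, PySem.List.foldl_add, zero_add]
  have hpredA : List.countP ((fun i : Int => decide (i ≥ 2)) ∘ fun k => ((F.count k : Nat) : Int))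
      (PySem.Set.ofList F) =
      List.countP (fun c => decide (2 ≤ F.count c)) (PySem.Set.ofList F) := by
    apply List.countP_congr
    intro c _
    simp only [Function.comp, ge_iff_le, decide_eq_true_eq]
    constructor <;> intro h <;> exact_mod_cast h
  have hcov : ∀ c ∈ PySem.Set.ofList F, decide (2 ≤ F.count c) = true →
      c.2.2 ∈ PySem.List.pyRange 0 longest := by
    intro c hc _
    have hcF : c ∈ F := (PySem.Set.mem_ofList F c).mp hc
    obtain ⟨p, hpP, hcp⟩ := List.mem_flatten.mp hcF
    obtain ⟨i, hi, hieq⟩ := List.mem_iff_getElem.mp hcp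
    have hsti := stamp_getElem p (hstP p hpP) i hi
    rw [hieq] at hsti
    have hle : ((p.length : Nat) : Int) ≤ longest := by
      apply PySem.List.le_maxD_id
      exact List.mem_map.mpr ⟨p, hpP, rfl⟩
    rw [PySem.List.mem_pyRange_one]
    omega
  have hpart := countP_partition (PySem.Set.ofList F) (fun c => decide (2 ≤ F.count c))
      (PySem.List.pyRange 0 longest) (PySem.List.nodup_pyRange_one 0 longest) hcov
  rw [hpredA, ← hpart]
  congr 1
  apply List.map_congr_left
  intro t ht
  have h0 : (0:Int) ≤ t := (PySem.List.mem_pyRange_one.mp ht).1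
  exact_mod_cast perT P hstP t h0
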